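-- pv_equiv track=rewrite | github.com/nkanderson/intrinsic-memory-SNNs | 2_training_and_simulation/train/scripts/history_coefficients.py | custom_slow_decay_bitshift
-- ===== SOURCE A (Python) =====
-- def custom_slow_decay_bitshift(history_length: int) -> list[int]:
--     """
--     Generate custom slow-decay bit-shift amounts with incrementing repetition.
--
--     Pattern:
--     - shift 0 once (k=0)
--     - shift 1 once (k=1)
--     - skip shift 2
--     - shift 3 once (k=2)
--     - shift 4 once (k=3)
--     - shift 5 repeats 3 times (k=4,5,6)
--     - shift 6 repeats 4 times (k=7,8,9,10)
--     - shift 7 repeats 5 times (k=11,12,13,14,15)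
--     - shift N repeats (N-2) times for N >= 5
--
--     This produces shift amounts: [0, 1, 3, 4, 5, 5, 5, 6, 6, 6, 6, 7, 7, 7, 7, 7, ...]
--
--     Args:
--         history_length: Number of shift amounts to generate
--
--     Returns:
--         List of custom slow-decay bit-shift amounts following the specified pattern
--     """
--     shift_sequence = [0, 1, 3, 4]  # Initial shifts: 2^0, 2^-1, 2^-3, 2^-4
--
--     # Build the full sequence: shift N repeats (N-2) times for N >= 5
--     shift = 5
--     while len(shift_sequence) < history_length:
--         repeat_count = shift - 2  # shift 5 -> 3 times, shift 6 -> 4 times, etc.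
--         shift_sequence.extend([shift] * repeat_count)
--         shift += 1
--
--     return shift_sequence[:history_length]
-- ===== SOURCE B (Python) =====
-- def _isqrt(n: int) -> int:
--     # integer square root by Newton's method (exact floor sqrt for n >= 0)
--     x = n
--     y = (x + 1) // 2
--     while y < x:
--         x = y
--         y = (x + n // x) // 2
--     return x
--
--
-- def custom_slow_decay_bitshift(history_length: int) -> list[int]:
--     prefix = [0, 1, 3, 4]
--     if history_length <= 4:
--         return prefix[:history_length]
--     # index k >= 4 holds shift N where N's run starts at 1 + (N-3)(N-2)/2;
--     # inverting that triangular-number formula gives N directly from k.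
--     return prefix + [(_isqrt(8 * k - 7) - 1) // 2 + 3 for k in range(4, history_length)]
-- ===== Notes on version B (the rewrite author's own statement) =====
-- stated objective: alternative
-- what changed: Replaces A's run-appending while-loop (extend with [shift]*count until long enough, then slice off the overshoot) by a direct per-index closed form: each element past the fixed prefix is computed by inverting the triangular run-start formula with a hand-written Newton integer square root, built in one list comprehension.
import Mathlib
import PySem

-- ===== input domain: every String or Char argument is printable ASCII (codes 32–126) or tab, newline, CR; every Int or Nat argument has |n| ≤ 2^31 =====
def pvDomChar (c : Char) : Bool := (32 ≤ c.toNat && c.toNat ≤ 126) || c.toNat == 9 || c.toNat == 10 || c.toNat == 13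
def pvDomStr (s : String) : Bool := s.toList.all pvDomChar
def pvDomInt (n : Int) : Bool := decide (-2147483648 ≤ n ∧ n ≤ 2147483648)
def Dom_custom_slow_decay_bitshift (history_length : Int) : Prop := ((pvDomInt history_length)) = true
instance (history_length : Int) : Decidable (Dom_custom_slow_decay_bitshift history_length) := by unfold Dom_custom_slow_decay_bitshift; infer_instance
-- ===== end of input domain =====

-- B replaces A's run-appending while-loop by a direct per-index closed form (Newton
-- integer sqrt inverting the triangular run-start formula); equal output everywhere.

-- ===== PORT A =====
-- the while-loop of A: extend shift_sequence with [shift]*(shift-2) until len >= history_length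
-- (h : 3 ≤ shift is an invariant of A's loop, carried only for termination)
def pvALoop (history_length : Int) (shift_sequence : List Int) (shift : Int)
    (h : 3 ≤ shift) : List Int :=
  if (shift_sequence.length : Int) < history_length then
    pvALoop history_length
      (shift_sequence ++ List.replicate (shift - 2).toNat shift) (shift + 1) (by omega)
  else shift_sequence
termination_by (history_length - shift_sequence.length).toNat
decreasing_by simp only [List.length_append, List.length_replicate]; omega

def custom_slow_decay_bitshift (history_length : Int) : List Int :=
  PySem.List.slice (pvALoop history_length [0, 1, 3, 4] 5 (by omega)) none (some history_length)

-- ===== PORT B =====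
-- _isqrt of Source B: Newton's method; all intermediate values are nonnegative ints,
-- so Nat's `/` is exactly Python's `//` here
def pvIsqrtLoop (n x y : Nat) : Nat :=
  if y < x then pvIsqrtLoop n y ((y + n / y) / 2) else x
termination_by x

def pvIsqrt (n : Nat) : Nat := pvIsqrtLoop n n ((n + 1) / 2)

-- the comprehension body of Source B: (_isqrt(8*k - 7) - 1) // 2 + 3
-- (8*k-7 ≥ 25 on every k the comprehension visits, so .toNat is exact)
def pvShiftOf (k : Int) : Int :=
  PySem.Int.floordiv ((pvIsqrt (8 * k - 7).toNat : Int) - 1) 2 + 3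

def custom_slow_decay_bitshift_alt (history_length : Int) : List Int :=
  let pfx : List Int := [0, 1, 3, 4]
  if history_length ≤ 4 then
    PySem.List.slice pfx none (some history_length)
  else
    pfx ++ (PySem.List.pyRange 4 history_length 1).map pvShiftOf

-- ===== PRECONDITION & SPEC =====
def Spec_custom_slow_decay_bitshift (history_length : Int) (out : List Int) : Prop := out = custom_slow_decay_bitshift_alt history_length
instance (history_length : Int) (out : List Int) : Decidable (Spec_custom_slow_decay_bitshift history_length out) := by unfold Spec_custom_slow_decay_bitshift; infer_instance

-- ===== CLAIM (what is proved, stated in full; the proofs are below) =====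
def Claim_equal_custom_slow_decay_bitshift : Prop := ∀ (history_length : Int), Dom_custom_slow_decay_bitshift history_length → Spec_custom_slow_decay_bitshift history_length (custom_slow_decay_bitshift history_length)

-- ===== LEMMAS AND PROOFS =====

-- Newton step never undershoots the integer square root
theorem pv_sqrt_le_newton (n x : Nat) (hx : 1 ≤ x) : Nat.sqrt n ≤ (x + n / x) / 2 := by
  set s := Nat.sqrt n with hs
  have hsn : s ^ 2 ≤ n := Nat.sqrt_le' n
  have hdiv : s * s / x ≤ n / x := Nat.div_le_div_right (by nlinarith)
  have hmod : x * (s * s / x) + s * s % x = s * s := Nat.div_add_mod _ _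
  have hlt : s * s % x < x := Nat.mod_lt _ hx
  have key : 2 * s ≤ x + s * s / x := by
    zify at hmod hlt hx ⊢
    nlinarith [sq_nonneg ((x : Int) - s)]
  omega

-- the Newton loop computes Nat.sqrt
theorem pv_isqrtLoop_eq (n : Nat) (hn : 1 ≤ n) :
    ∀ x, 1 ≤ x → Nat.sqrt n ≤ x → pvIsqrtLoop n x ((x + n / x) / 2) = Nat.sqrt n := by
  intro x
  induction x using Nat.strong_induction_on with
  | _ x ih =>
    intro hx hsx
    rw [pvIsqrtLoop]
    split
    · rename_i hlt
      have h1 : Nat.sqrt n ≤ (x + n / x) / 2 := pv_sqrt_le_newton n x hx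
      have h2 : 1 ≤ (x + n / x) / 2 := le_trans (Nat.le_sqrt'.mpr (by nlinarith)) h1
      exact ih _ hlt h2 h1
    · rename_i hge
      have hge' : x ≤ (x + n / x) / 2 := Nat.le_of_not_lt hge
      have h2x : 2 * x ≤ x + n / x := by omega
      have hxx : x ≤ n / x := by omega
      have : x * x ≤ n := (Nat.le_div_iff_mul_le hx).mp hxx
      have : x ≤ Nat.sqrt n := Nat.le_sqrt'.mpr (by nlinarith)
      omega

theorem pv_isqrt_eq (n : Nat) : pvIsqrt n = Nat.sqrt n := by
  by_cases hn : n = 0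
  · subst hn; rw [pvIsqrt, pvIsqrtLoop]; rfl
  · have hn1 : 1 ≤ n := by omega
    have : (n + 1) / 2 = (n + n / n) / 2 := by rw [Nat.div_self hn1]
    rw [pvIsqrt, this]
    exact pv_isqrtLoop_eq n hn1 n hn1 (Nat.sqrt_le_self n)

-- inverting the triangular run-start formula: the run of shift m+3 covers
-- exactly the indices k with 1 + m(m+1)/2 ≤ k < 1 + (m+1)(m+2)/2
theorem pv_sqrt_inv (m k : Nat) (hm : 2 ≤ m)
    (h1 : 2 + m * (m + 1) ≤ 2 * k) (h2 : 2 * k < 2 + (m + 1) * (m + 2)) :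
    (Nat.sqrt (8 * k - 7) - 1) / 2 = m := by
  have hlo : (2 * m + 1) ^ 2 ≤ 8 * k - 7 := by
    have h7 : 7 ≤ 8 * k := by nlinarith
    have : (2 * m + 1) ^ 2 + 7 ≤ 8 * k := by nlinarith
    omega
  have hhi : 8 * k - 7 < (2 * m + 3) ^ 2 := by
    have : 8 * k < (2 * m + 3) ^ 2 + 7 := by nlinarith
    omega
  have ha : 2 * m + 1 ≤ Nat.sqrt (8 * k - 7) := Nat.le_sqrt'.mpr hlo
  have hb : Nat.sqrt (8 * k - 7) < 2 * m + 3 := Nat.sqrt_lt'.mpr hhi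
  omega

theorem pv_shiftOf_nat (k : Nat) (hk : 4 ≤ k) :
    pvShiftOf (k : Int) = ((Nat.sqrt (8 * k - 7) - 1) / 2 : Nat) + 3 := by
  have h1 : (8 * (k : Int) - 7).toNat = 8 * k - 7 := by omega
  have h5 : 5 ≤ Nat.sqrt (8 * k - 7) := Nat.le_sqrt'.mpr (by norm_num; omega)
  rw [pvShiftOf, h1, pv_isqrt_eq]
  have h2 : ((Nat.sqrt (8 * k - 7) : Int) - 1) = ((Nat.sqrt (8 * k - 7) - 1 : Nat) : Int) := by omega
  rw [h2, (by norm_num : (2 : Int) = ((2 : Nat) : Int)), PySem.Int.floordiv_natCast]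

-- the full infinite pattern, truncated at length L (for L ≥ 4)
def pvPatt (L : Nat) : List Int :=
  [0, 1, 3, 4] ++ (List.range (L - 4)).map (fun i : Nat => pvShiftOf (4 + (i : Int)))

theorem pvPatt_length (L : Nat) (hL : 4 ≤ L) : (pvPatt L).length = L := by
  simp [pvPatt]; omega

-- switching the shift argument of A's loop along an equality (the bound proof depends on it)
theorem pvALoop_congr_shift (n : Int) (seq : List Int) (s1 s2 : Int)
    (h1 : 3 ≤ s1) (h2 : 3 ≤ s2) (e : s1 = s2) :
    pvALoop n seq s1 h1 = pvALoop n seq s2 h2 := by subst e; rfl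

-- one iteration of A's loop extends pvPatt(start m) to pvPatt(start (m+1))
theorem pvPatt_step (m : Nat) (hm : 2 ≤ m) :
    pvPatt (1 + m * (m + 1) / 2) ++ List.replicate (((m : Int) + 3 - 2)).toNat ((m : Int) + 3)
      = pvPatt (1 + (m + 1) * (m + 2) / 2) := by
  have hd1 : 2 ∣ m * (m + 1) := (Nat.even_mul_succ_self m).two_dvd
  have hq : (m + 1) * (m + 2) = m * (m + 1) + 2 * (m + 1) := by ring
  have h6 : 6 ≤ m * (m + 1) := by nlinarith
  have hrep : ((m : Int) + 3 - 2).toNat = m + 1 := by omega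
  have hS : 1 + (m + 1) * (m + 2) / 2 - 4 = (1 + m * (m + 1) / 2 - 4) + (m + 1) := by omega
  rw [pvPatt, pvPatt, hrep, hS, List.range_add, List.map_append, List.append_assoc]
  congr 2
  rw [List.map_map]
  apply List.ext_getElem
  · simp
  · intro i h1 h2
    simp only [List.getElem_map, List.getElem_range, List.getElem_replicate, Function.comp]
    have hi : i < m + 1 := by simpa using h1
    have hk : (4 : Int) + ((1 + m * (m + 1) / 2 - 4 + i : Nat) : Int)
        = ((1 + m * (m + 1) / 2 + i : Nat) : Int) := by omega
    rw [hk, pv_shiftOf_nat _ (by omega)]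
    rw [pv_sqrt_inv m _ hm (by omega) (by omega)]

-- A's loop, started on pvPatt(start m) with shift m+3, returns pvPatt L for some L ≥ n
theorem pv_loop_patt (n : Int) (fuel : Nat) :
    ∀ (m : Nat), 2 ≤ m → n ≤ (fuel : Int) + ((1 + m * (m + 1) / 2 : Nat) : Int) →
    ∀ (h : 3 ≤ (m : Int) + 3),
    ∃ L : Nat, 1 + m * (m + 1) / 2 ≤ L ∧ n ≤ (L : Int) ∧
      pvALoop n (pvPatt (1 + m * (m + 1) / 2)) ((m : Int) + 3) h = pvPatt L := by
  induction fuel with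
  | zero =>
    intro m hm hfuel h
    have h6 : 6 ≤ m * (m + 1) := by nlinarith
    have hf : n ≤ ((1 + m * (m + 1) / 2 : Nat) : Int) := by omega
    refine ⟨1 + m * (m + 1) / 2, le_refl _, hf, ?_⟩
    rw [pvALoop, pvPatt_length _ (by omega), if_neg (by omega)]
  | succ f ih =>
    intro m hm hfuel h
    have h6 : 6 ≤ m * (m + 1) := by nlinarith
    rw [pvALoop, pvPatt_length _ (by omega)]
    by_cases hc : ((1 + m * (m + 1) / 2 : Nat) : Int) < n
    · rw [if_pos hc, pvPatt_step m hm]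
      have hd1 : 2 ∣ m * (m + 1) := (Nat.even_mul_succ_self m).two_dvd
      have hq : (m + 1) * (m + 1 + 1) = m * (m + 1) + 2 * (m + 1) := by ring
      obtain ⟨L, hL1, hL2, hL3⟩ := ih (m + 1) (by omega) (by omega) (by push_cast; omega)
      have e2 : m + 1 + 1 = m + 2 := rfl
      rw [e2] at hL1 hL3
      refine ⟨L, by omega, hL2, ?_⟩
      rw [pvALoop_congr_shift n _ _ (((m + 1 : Nat) : Int) + 3) _ (by push_cast; omega)
        (by push_cast; ring)]
      exact hL3
    · rw [if_neg hc]
      exact ⟨1 + m * (m + 1) / 2, le_refl _, by omega, rfl⟩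

-- ===== VERDICT (by name: the statement is the Claim_ definition above) =====
theorem custom_slow_decay_bitshift_spec : Claim_equal_custom_slow_decay_bitshift := by
  intro n _
  unfold Spec_custom_slow_decay_bitshift custom_slow_decay_bitshift custom_slow_decay_bitshift_alt
  by_cases hn : n ≤ 4
  · rw [pvALoop]
    simp only [List.length_cons, List.length_nil]
    rw [if_neg (by omega)]
    simp only [if_pos hn]
  · rw [if_neg hn]
    have hstart : pvPatt (1 + 2 * (2 + 1) / 2) = [0, 1, 3, 4] := by
      simp [pvPatt]
    obtain ⟨L, hL1, hL2, hL3⟩ :=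
      pv_loop_patt n n.toNat 2 (le_refl 2) (by push_cast; omega) (by norm_num)
    rw [hstart] at hL3
    have hL3' : pvALoop n [0, 1, 3, 4] 5 (by omega) = pvPatt L := by
      rw [pvALoop_congr_shift n _ 5 (((2 : Nat) : Int) + 3) (by omega) (by omega) (by norm_num)]
      exact hL3
    rw [hL3', PySem.List.slice_to _ (by omega : (0 : Int) ≤ n), pvPatt]
    have h4n : 4 ≤ n.toNat := by omega
    have hnL : n.toNat ≤ L := by omega
    rw [List.take_append, List.take_of_length_le (by simp; omega),
      ← List.map_take, List.take_range, PySem.List.pyRange_one, List.map_map]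
    have hmin : min (n.toNat - ([0, 1, 3, 4] : List Int).length) (L - 4) = (n - 4).toNat := by
      simp; omega
    rw [hmin]
    simp [Function.comp]
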